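-- pv_equiv track=rewrite | github.com/mammoai/cobra-db | src/cobra_db/utils.py | intersect_dicts_allow_empty_minority
-- ===== SOURCE A (Python) =====
-- from typing import List
--
-- def intersect_dicts_allow_empty_minority(dicts: List[dict]) -> dict:
--     """
--     Reads first level keys and returns a dict with all the keys where the values are
--     equal.
--     If the key does not exist in less than half, but all the other dicts that contain it
--     agree on the value, then the key is kept.
--     """
--     # get a set of all the possible keys
--     all_keys = set()
--     ans = dict()
--     n_dicts = len(dicts)
--     majority = (n_dicts // 2) + 1
--     for d in dicts:
--         for k in d.keys():
--             all_keys.add(k)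
--     for k in sorted(all_keys):
--         add_key = True
--         # get values for k of all dicts if it exists
--         values = [d[k] for d in dicts if d.get(k, None) is not None]
--         n_values = len(values)
--         if n_values < majority:
--             add_key = False
--         if n_values > 1:
--             str_v0 = str(values[0])
--             for v in values[1:]:
--                 if str_v0 != str(v):
--                     add_key = False
--                     break
--         if n_values == 0:  # in case key existed but had a None
--             add_key = False
--         if add_key:
--             ans[k] = values[0]
--     return ans
-- ===== SOURCE B (Python) =====
-- def intersect_dicts_allow_empty_minority(dicts):
--     """One pass over all entries (skipping None values, which A treats as absent),
--     grouping (first value, count, agree) per key; then emit sorted keys that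
--     reach majority with agreeing values."""
--     majority = len(dicts) // 2 + 1
--     acc = {}
--     for d in dicts:
--         for k, v in d.items():
--             if v is None:
--                 continue
--             if k in acc:
--                 v0, c, ok = acc[k]
--                 acc[k] = (v0, c + 1, ok and str(v0) == str(v))
--             else:
--                 acc[k] = (v, 1, True)
--     ans = {}
--     for k in sorted(acc):
--         v0, c, ok = acc[k]
--         if c >= majority and ok:
--             ans[k] = v0
--     return ans
-- ===== Notes on version B (the rewrite author's own statement) =====
-- stated objective: faster
-- what changed: Instead of scanning every dict again for each key (K*N lookups), B makes a single pass over all entries (skipping None values, which A treats as absent) accumulating (first value, count, agree) per key in one dict, then emits the sorted qualifying keys.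
import Mathlib
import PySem

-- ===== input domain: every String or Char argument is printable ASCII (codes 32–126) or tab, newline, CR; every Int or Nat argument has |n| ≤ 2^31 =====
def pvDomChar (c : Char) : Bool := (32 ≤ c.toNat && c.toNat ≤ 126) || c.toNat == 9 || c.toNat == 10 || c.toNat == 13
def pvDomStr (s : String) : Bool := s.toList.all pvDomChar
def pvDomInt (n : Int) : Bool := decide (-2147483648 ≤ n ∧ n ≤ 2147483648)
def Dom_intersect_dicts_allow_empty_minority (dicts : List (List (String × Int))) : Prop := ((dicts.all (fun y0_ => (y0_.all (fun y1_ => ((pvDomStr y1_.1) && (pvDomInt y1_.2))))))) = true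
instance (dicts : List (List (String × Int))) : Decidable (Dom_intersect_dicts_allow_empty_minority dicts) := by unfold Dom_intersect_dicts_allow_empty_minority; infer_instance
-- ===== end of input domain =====

-- B replaces A's per-key rescan of every dict by a single grouping pass over all entries (faster).


-- ===== PORT A =====
def intersect_dicts_allow_empty_minority (dicts : List (List (String × Int))) : List (String × Int) :=
  let all_keys : PySem.Set String :=
    dicts.foldl (fun s d => (PySem.Dict.mk d).keys.foldl (fun s k => PySem.Set.add s k) s) PySem.Set.empty
  let n_dicts : Int := dicts.length
  let majority : Int := PySem.Int.floordiv n_dicts 2 + 1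
  let ans : PySem.Dict String Int :=
    (PySem.List.sorted all_keys (fun x => x) false).foldl (fun ans k =>
      -- values = [d[k] for d in dicts if d.get(k, None) is not None]
      let values : List Int := dicts.filterMap (fun d => (PySem.Dict.mk d).get? k)
      let n_values : Int := values.length
      let add_key := true
      let add_key := if n_values < majority then false else add_key
      let add_key := if 1 < n_values then
          match values with
          | v0 :: rest =>
            rest.foldl (fun ok v => if PySem.Int.toStr v0 != PySem.Int.toStr v then false else ok) add_key
          | [] => add_key       -- unreachable: n_values > 1
        else add_key
      let add_key := if n_values == 0 then false else add_key
      if add_key then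
        match values with
        | v0 :: _ => ans.insert k v0
        | [] => ans             -- unreachable: add_key implies values ≠ []
      else ans) PySem.Dict.empty
  ans.items

-- ===== PORT B =====
-- one entry of B's grouping loop: acc[k] = (first value, count so far, values agree so far)
-- (B's 'if v is None: continue' has no counterpart here: values are Int, None cannot occur)
def pvGroupStep (acc : PySem.Dict String (Int × Int × Bool)) (p : String × Int) :
    PySem.Dict String (Int × Int × Bool) :=
  acc.insert p.1
    (match acc.get? p.1 with
     | some (v0, c, ok) => (v0, c + 1, ok && (PySem.Int.toStr v0 == PySem.Int.toStr p.2))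
     | none => (p.2, 1, true))

def intersect_dicts_allow_empty_minority_alt (dicts : List (List (String × Int))) : List (String × Int) :=
  let majority : Int := PySem.Int.floordiv (dicts.length : Int) 2 + 1
  let acc : PySem.Dict String (Int × Int × Bool) :=
    dicts.foldl (fun acc d => d.foldl pvGroupStep acc) PySem.Dict.empty
  let ans : PySem.Dict String Int :=
    (PySem.List.sorted acc.keys (fun x => x) false).foldl (fun ans k =>
      match acc.get? k with
      | some (v0, c, ok) => if c ≥ majority && ok then ans.insert k v0 else ans
      | none => ans) PySem.Dict.empty
  ans.items

-- ===== PRECONDITION & SPEC =====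
-- Pre_ restricts to the natural domain: inner association lists with distinct keys (a Python dict
-- cannot hold a duplicate key, so this excludes no input the Python A can receive).
def Pre_intersect_dicts_allow_empty_minority (dicts : List (List (String × Int))) : Prop :=
  ∀ d ∈ dicts, (d.map Prod.fst).Nodup
instance (dicts : List (List (String × Int))) : Decidable (Pre_intersect_dicts_allow_empty_minority dicts) := by unfold Pre_intersect_dicts_allow_empty_minority; infer_instance
def pvWitness_intersect_dicts_allow_empty_minority : (List (List (String × Int))) :=
  [[("a", 1), ("b", 2)], [("a", 1)], [("b", 3)]]
def Spec_intersect_dicts_allow_empty_minority (dicts : List (List (String × Int))) (out : List (String × Int)) : Prop := out = intersect_dicts_allow_empty_minority_alt dicts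
instance (dicts : List (List (String × Int))) (out : List (String × Int)) : Decidable (Spec_intersect_dicts_allow_empty_minority dicts out) := by unfold Spec_intersect_dicts_allow_empty_minority; infer_instance

-- ===== CLAIM (what is proved, stated in full; the proofs are below) =====
def Claim_equal_intersect_dicts_allow_empty_minority : Prop := ∀ (dicts : List (List (String × Int))), Dom_intersect_dicts_allow_empty_minority dicts → Pre_intersect_dicts_allow_empty_minority dicts → Spec_intersect_dicts_allow_empty_minority dicts (intersect_dicts_allow_empty_minority dicts)

-- ===== LEMMAS AND PROOFS =====

-- summary cell built by B's grouping loop, expressed as a fold over the value list of one key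
def pvPush (o : Option (Int × Int × Bool)) (v : Int) : Option (Int × Int × Bool) :=
  match o with
  | some (v0, c, ok) => some (v0, c + 1, ok && (PySem.Int.toStr v0 == PySem.Int.toStr v))
  | none => some (v, 1, true)

def pvExtend (o : Option (Int × Int × Bool)) : List Int → Option (Int × Int × Bool)
  | [] => o
  | v :: vs => pvExtend (pvPush o v) vs

lemma pvGroupStep_eq (acc : PySem.Dict String (Int × Int × Bool)) (p : String × Int) :
    pvGroupStep acc p = acc.insert p.1 ((pvPush (acc.get? p.1) p.2).getD (p.2, 1, true)) := by
  unfold pvGroupStep pvPush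
  cases h : acc.get? p.1 with
  | none => rfl
  | some t => obtain ⟨v0, c, ok⟩ := t; rfl

lemma foldl_pvGroupStep_get?_of_not_mem (d : List (String × Int))
    (acc : PySem.Dict String (Int × Int × Bool)) (k : String) (h : k ∉ d.map Prod.fst) :
    (d.foldl pvGroupStep acc).get? k = acc.get? k := by
  induction d generalizing acc with
  | nil => rfl
  | cons p t ih =>
    simp only [List.map_cons, List.mem_cons, not_or] at h
    rw [List.foldl_cons, ih _ h.2, pvGroupStep_eq, PySem.Dict.get?_insert_of_ne _ _ h.1]

lemma foldl_pvGroupStep_get? (d : List (String × Int))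
    (acc : PySem.Dict String (Int × Int × Bool)) (k : String) (hnd : (d.map Prod.fst).Nodup) :
    (d.foldl pvGroupStep acc).get? k =
      match (PySem.Dict.mk d).get? k with
      | none => acc.get? k
      | some v => pvPush (acc.get? k) v := by
  induction d generalizing acc with
  | nil => rfl
  | cons p t ih =>
    obtain ⟨k0, v0⟩ := p
    simp only [List.map_cons, List.nodup_cons] at hnd
    by_cases hk : k0 = k
    · subst hk
      rw [List.foldl_cons, foldl_pvGroupStep_get?_of_not_mem _ _ _ hnd.1, pvGroupStep_eq]
      simp [PySem.Dict.get?_mk_cons, pvPush]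
      cases h : acc.get? k0 with
      | none => simp
      | some t => obtain ⟨a, b, c⟩ := t; simp
    · rw [List.foldl_cons, ih _ hnd.2]
      simp only [PySem.Dict.get?_mk_cons, beq_iff_eq, if_neg hk, pvGroupStep_eq]
      rw [PySem.Dict.get?_insert_of_ne _ _ (Ne.symm hk)]

lemma foldl_group_get? (dicts : List (List (String × Int)))
    (acc : PySem.Dict String (Int × Int × Bool)) (k : String)
    (hpre : ∀ d ∈ dicts, (d.map Prod.fst).Nodup) :
    (dicts.foldl (fun acc d => d.foldl pvGroupStep acc) acc).get? k
      = pvExtend (acc.get? k) (dicts.filterMap (fun d => (PySem.Dict.mk d).get? k)) := by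
  induction dicts generalizing acc with
  | nil => rfl
  | cons d t ih =>
    rw [List.foldl_cons, ih _ (fun d hd => hpre d (List.mem_cons_of_mem _ hd)),
      foldl_pvGroupStep_get? d acc k (hpre d (List.mem_cons_self ..))]
    cases h : (PySem.Dict.mk d).get? k <;> simp [h, pvExtend]

lemma pvExtend_some (v0 c : Int) (ok : Bool) (vs : List Int) :
    pvExtend (some (v0, c, ok)) vs
      = some (v0, c + vs.length, ok && vs.all (fun v => PySem.Int.toStr v0 == PySem.Int.toStr v)) := by
  induction vs generalizing c ok with
  | nil => simp [pvExtend]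
  | cons v t ih =>
    rw [pvExtend, pvPush, ih]
    simp [Bool.and_assoc]
    omega

lemma pv_not_any_ne (v0 : Int) (rest : List Int) :
    (!rest.any (fun v => PySem.Int.toStr v0 != PySem.Int.toStr v))
      = rest.all (fun v => PySem.Int.toStr v0 == PySem.Int.toStr v) := by
  induction rest with
  | nil => rfl
  | cons a t ih =>
    simp only [List.any_cons, List.all_cons, Bool.not_or, bne, Bool.not_not] at ih ⊢
    rw [ih]

lemma foldl_group_keys (dicts : List (List (String × Int)))
    (acc : PySem.Dict String (Int × Int × Bool)) :
    (dicts.foldl (fun acc d => d.foldl pvGroupStep acc) acc).keys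
      = dicts.foldl (fun s d => (PySem.Dict.mk d).keys.foldl (fun s k => PySem.Set.add s k) s) acc.keys := by
  induction dicts generalizing acc with
  | nil => rfl
  | cons d t ih =>
    rw [List.foldl_cons, List.foldl_cons, ih]
    congr 1
    have h1 : d.foldl pvGroupStep acc
        = d.foldl (fun a (p : String × Int) => a.insert p.1 ((pvPush (a.get? p.1) p.2).getD (p.2, 1, true))) acc := by
      apply PySem.List.foldl_congr_mem
      intro a p _
      exact pvGroupStep_eq a p
    rw [h1, PySem.Dict.keys_foldl_insert_key]
    rfl

-- ===== VERDICT (by name: the statement is the Claim_ definition above) =====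
theorem intersect_dicts_allow_empty_minority_spec : Claim_equal_intersect_dicts_allow_empty_minority := by
  intro dicts _ hpre
  unfold Spec_intersect_dicts_allow_empty_minority
  unfold intersect_dicts_allow_empty_minority intersect_dicts_allow_empty_minority_alt
  have hk : (dicts.foldl (fun acc d => d.foldl pvGroupStep acc) PySem.Dict.empty).keys
      = dicts.foldl (fun s d => (PySem.Dict.mk d).keys.foldl (fun s k => PySem.Set.add s k) s)
          PySem.Set.empty := by
    rw [foldl_group_keys]
    rfl
  have hmaj : (0 : Int) < PySem.Int.floordiv (dicts.length : Int) 2 + 1 := by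
    have h0 : (0 : Int) ≤ PySem.Int.floordiv (dicts.length : Int) 2 := by
      rw [PySem.Int.floordiv_eq_ediv_of_pos (by norm_num)]
      exact Int.ediv_nonneg (by positivity) (by norm_num)
    omega
  simp only []
  rw [hk]
  generalize hM : PySem.Int.floordiv (dicts.length : Int) 2 + 1 = M
  rw [hM] at hmaj
  congr 1
  apply PySem.List.foldl_congr_mem
  intro ans k _
  rw [foldl_group_get? dicts PySem.Dict.empty k hpre]
  cases hv : dicts.filterMap (fun d => (PySem.Dict.mk d).get? k) with
  | nil =>
    simp only [pvExtend, List.length_nil, Nat.cast_zero]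
    rw [if_pos hmaj, PySem.Dict.get?_empty]
    simp
  | cons v0 rest =>
    have hext : pvExtend (PySem.Dict.empty.get? k) (v0 :: rest)
        = some (v0, 1 + (rest.length : Int), rest.all (fun v => PySem.Int.toStr v0 == PySem.Int.toStr v)) := by
      rw [PySem.Dict.get?_empty, pvExtend, pvPush, pvExtend_some]
      simp
    rw [hext]
    simp only [List.length_cons, Nat.cast_add, Nat.cast_one]
    by_cases hlt : ((rest.length : Int) + 1) < M
    · -- too few values: both sides keep ans
      rw [if_pos hlt]
      have hge : ¬ ((1 : Int) + (rest.length : Int) ≥ M) := by omega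
      by_cases h1 : (1 : Int) < (rest.length : Int) + 1
      · rw [if_pos h1, PySem.List.foldl_if_false_eq]
        simp [hge]
      · rw [if_neg h1]
        simp [hge]
    · -- majority reached: both sides insert iff all values agree
      rw [if_neg hlt]
      have hge : (1 : Int) + (rest.length : Int) ≥ M := by omega
      by_cases h1 : (1 : Int) < (rest.length : Int) + 1
      · rw [if_pos h1, PySem.List.foldl_if_false_eq]
        have hn0 : (((rest.length : Int) + 1) == 0) = false := by
          have := Int.natCast_nonneg rest.length
          simp only [beq_eq_false_iff_ne, ne_eq]
          omega
        simp only [hn0, Bool.false_eq_true, if_false, Bool.true_and, pv_not_any_ne]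
        have hb : (decide (1 + (rest.length : Int) ≥ M)
            && rest.all (fun v => PySem.Int.toStr v0 == PySem.Int.toStr v))
            = rest.all (fun v => PySem.Int.toStr v0 == PySem.Int.toStr v) := by
          simp [hge]
        rw [hb]
      · rw [if_neg h1]
        have hrest : rest = [] := by
          cases rest with
          | nil => rfl
          | cons a t =>
            exfalso
            apply h1
            simp only [List.length_cons, Nat.cast_add, Nat.cast_one]
            omega
        subst hrest
        have hge' : M ≤ (1 : Int) := by simpa using hge
        simp [hge']
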